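-- pv_equiv track=rewrite | github.com/nowellclosser/dailycodingproblem | 2019-03-18-palindrome-with_deletion.py | can_make_palindrome
-- ===== SOURCE A (Python) =====
-- def can_make_palindrome(string, max_deletions):
--     if max_deletions < 0:
--         return False
--
--     if len(string) <= max(1, max_deletions):
--         return True
--
--     if string[0] == string[len(string) - 1]:
--         if can_make_palindrome(string[1:-1], max_deletions):
--             return True
--
--     return (can_make_palindrome(string[1:], max_deletions - 1) or
--             can_make_palindrome(string[:-1], max_deletions - 1))
-- ===== SOURCE B (Python) =====
-- def can_make_palindrome(string, max_deletions):
--     if max_deletions < 0: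
--         return False
--     n = len(string)
--     if n <= max_deletions + 1:
--         return True  # deleting all but one character always leaves a palindrome
--     # bottom-up interval DP: row for length l holds, at index i, the minimum
--     # number of deletions turning string[i:i+l] into a palindrome
--     prev2 = [0] * (n + 1)  # row for length l-2 (initially l = 0)
--     prev1 = [0] * n        # row for length l-1 (initially l = 1)
--     for l in range(2, n + 1):
--         cur = [prev2[i + 1] if string[i] == string[i + l - 1]
--                else 1 + min(prev1[i + 1], prev1[i])
--                for i in range(n - l + 1)]
--         prev2 = prev1
--         prev1 = cur
--     return prev1[0] <= max_deletions
-- ===== Notes on version B (the rewrite author's own statement) =====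
-- stated objective: alternative
-- what changed: A answers by exponential backtracking that threads the remaining deletion budget through recursive calls; B computes the minimum number of deletions for every substring once with a bottom-up interval DP and compares that single number to the budget.
import Mathlib
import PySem

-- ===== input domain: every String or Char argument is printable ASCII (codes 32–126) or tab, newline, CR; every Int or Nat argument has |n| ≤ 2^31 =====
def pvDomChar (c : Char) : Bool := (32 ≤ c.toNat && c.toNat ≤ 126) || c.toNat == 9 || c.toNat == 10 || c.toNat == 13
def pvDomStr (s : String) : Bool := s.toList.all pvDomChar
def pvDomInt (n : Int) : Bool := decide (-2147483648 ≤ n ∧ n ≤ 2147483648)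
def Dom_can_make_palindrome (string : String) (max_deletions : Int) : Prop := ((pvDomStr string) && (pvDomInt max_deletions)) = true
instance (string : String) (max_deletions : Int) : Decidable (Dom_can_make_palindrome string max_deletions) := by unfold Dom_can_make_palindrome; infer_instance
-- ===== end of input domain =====

-- B changes the algorithm: instead of A's exponential budget-threading backtracking search it
-- computes the minimum number of deletions once (bottom-up interval DP) and compares it to the budget.

-- ===== PORT A =====
-- Literal transliteration of A's recursion; the string slices s[1:-1], s[1:], s[:-1] are taken
-- on the branch where len(s) ≥ 2, where drop 1 / dropLast are exactly Python's slices.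
def canA (s : List Char) (k : Int) : Bool :=
  if k < 0 then false
  else if (s.length : Int) ≤ max 1 k then true
  else if (s.head? == s.getLast?) && canA ((s.drop 1).dropLast) k then true
  else canA (s.drop 1) (k - 1) || canA s.dropLast (k - 1)
termination_by s.length
decreasing_by
  all_goals simp_all [List.length_dropLast]
  all_goals omega

def can_make_palindrome (string : String) (max_deletions : Int) : Bool :=
  canA string.toList max_deletions

-- ===== PORT B =====
-- Transliteration of Source B: guard checks, then a bottom-up interval DP over substring
-- lengths; the row for length l holds at index i the minimum deletions for string[i:i+l].
-- Source B indexes prev2/prev1/string only in range; the total getD / [·]? lookups are used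
-- solely to make the port total and are exact on those in-range indices.
def bStep (cs : List Char) (n l : Nat) (prev2 prev1 : List Nat) : List Nat :=
  (List.range (n - l + 1)).map (fun i =>
    if cs[i]? == cs[i + l - 1]? then prev2.getD (i + 1) 0
    else 1 + min (prev1.getD (i + 1) 0) (prev1.getD i 0))

def bLoop (cs : List Char) (n : Nat) : List Nat × List Nat :=
  (List.range' 2 (n - 1)).foldl (fun p l => (p.2, bStep cs n l p.1 p.2))
    (List.replicate (n + 1) 0, List.replicate n 0)

def can_make_palindrome_alt (string : String) (max_deletions : Int) : Bool :=
  if max_deletions < 0 then false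
  else if (string.toList.length : Int) ≤ max_deletions + 1 then true
  else decide (((bLoop string.toList string.toList.length).2.getD 0 0 : Int) ≤ max_deletions)

-- ===== PRECONDITION & SPEC =====
def Spec_can_make_palindrome (string : String) (max_deletions : Int) (out : Bool) : Prop := out = can_make_palindrome_alt string max_deletions
instance (string : String) (max_deletions : Int) (out : Bool) : Decidable (Spec_can_make_palindrome string max_deletions out) := by unfold Spec_can_make_palindrome; infer_instance

-- ===== CLAIM (what is proved, stated in full; the proofs are below) =====
def Claim_equal_can_make_palindrome : Prop := ∀ (string : String) (max_deletions : Int), Dom_can_make_palindrome string max_deletions → Spec_can_make_palindrome string max_deletions (can_make_palindrome string max_deletions)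

-- ===== LEMMAS AND PROOFS =====

-- Proof-only bridge: the minimum-deletion distance as a recursion on one list.
def minDel (s : List Char) : Nat :=
  if s.length ≤ 1 then 0
  else if s.head? == s.getLast? then minDel ((s.drop 1).dropLast)
  else 1 + min (minDel (s.drop 1)) (minDel s.dropLast)
termination_by s.length
decreasing_by
  all_goals simp_all [List.length_dropLast]
  all_goals omega

-- Every list of length ≥ 2 splits as first element, middle, last element.
lemma split2 (s : List Char) (h : 2 ≤ s.length) : ∃ a mid b, s = a :: (mid ++ [b]) := by
  match s, h with
  | a :: t, h =>
    rcases t.eq_nil_or_concat with rfl | ⟨mid, b, rfl⟩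
    · simp at h
    · exact ⟨a, mid, b, by simp⟩

lemma minDel_nil : minDel [] = 0 := by rw [minDel]; simp
lemma minDel_single (a : Char) : minDel [a] = 0 := by rw [minDel]; simp

lemma minDel_split (a b : Char) (mid : List Char) :
    minDel (a :: (mid ++ [b])) =
      if a = b then minDel mid
      else 1 + min (minDel (mid ++ [b])) (minDel (a :: mid)) := by
  rw [minDel]
  have hlast : (a :: (mid ++ [b])).getLast? = some b := by
    rw [show a :: (mid ++ [b]) = (a :: mid) ++ [b] by simp]
    exact List.getLast?_concat
  have hdl : (a :: (mid ++ [b])).dropLast = a :: mid := by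
    rw [show a :: (mid ++ [b]) = (a :: mid) ++ [b] by simp]
    exact List.dropLast_concat ..
  simp [hlast, hdl]

lemma canA_split (a b : Char) (mid : List Char) (k : Int)
    (hk : 0 ≤ k) (hlen : max 1 k < ((a :: (mid ++ [b])).length : Int)) :
    canA (a :: (mid ++ [b])) k =
      (((a == b) && canA mid k) || (canA (mid ++ [b]) (k - 1) || canA (a :: mid) (k - 1))) := by
  rw [canA]
  have hlast : (a :: (mid ++ [b])).getLast? = some b := by
    rw [show a :: (mid ++ [b]) = (a :: mid) ++ [b] by simp]
    exact List.getLast?_concat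
  have hdl : (a :: (mid ++ [b])).dropLast = a :: mid := by
    rw [show a :: (mid ++ [b]) = (a :: mid) ++ [b] by simp]
    exact List.dropLast_concat ..
  have h1 : ¬ k < 0 := by omega
  have h2 : ¬ ((a :: (mid ++ [b])).length : Int) ≤ max 1 k := by omega
  simp only [h1, if_false, h2, hlast, hdl, List.drop_succ_cons, List.drop_zero,
    List.dropLast_concat]
  by_cases hab : a = b <;> simp [hab]

-- Removing one character from either end raises the minimum deletion count by at most 1,
-- and adding one character at either end raises it by at most 1.
lemma minDel_move : ∀ n (t : List Char), t.length = n →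
    ((minDel (t.drop 1) ≤ 1 + minDel t ∧ minDel t.dropLast ≤ 1 + minDel t) ∧
     ∀ c, minDel (c :: t) ≤ 1 + minDel t ∧ minDel (t ++ [c]) ≤ 1 + minDel t) := by
  intro n
  induction n using Nat.strong_induction_on with
  | _ n IH =>
    intro t ht
    by_cases hle : t.length ≤ 1
    · match t, hle with
      | [], _ => simp [minDel_nil, minDel_single]
      | [a], _ =>
        refine ⟨by simp [minDel_nil, minDel_single], fun c => ?_⟩
        have h1 : minDel [c, a] ≤ 1 := by
          have := minDel_split c a []
          simp at this
          rw [this]; split_ifs <;> simp [minDel_nil, minDel_single]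
        have h2 : minDel [a, c] ≤ 1 := by
          have := minDel_split a c []
          simp at this
          rw [this]; split_ifs <;> simp [minDel_nil, minDel_single]
        simpa [minDel_single] using ⟨h1, h2⟩
    · obtain ⟨a, mid, b, rfl⟩ := split2 t (by omega)
      have hlen : mid.length + 2 = n := by simpa using ht
      have htail : (a :: (mid ++ [b])).drop 1 = mid ++ [b] := by simp
      have hinit : (a :: (mid ++ [b])).dropLast = a :: mid := by
        rw [show a :: (mid ++ [b]) = (a :: mid) ++ [b] by simp]
        exact List.dropLast_concat ..
      have IHmid := IH mid.length (by omega) mid rfl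
      have IHtail := IH (mid ++ [b]).length (by simp; omega) (mid ++ [b]) rfl
      have IHinit := IH (a :: mid).length (by simp; omega) (a :: mid) rfl
      have htail' : minDel mid ≤ 1 + minDel (a :: mid) := by
        simpa using IHinit.1.1
      have hinit' : minDel mid ≤ 1 + minDel (mid ++ [b]) := by
        have := IHtail.1.2
        rwa [List.dropLast_concat] at this
      have hL2 : minDel ((a :: (mid ++ [b])).drop 1) ≤ 1 + minDel (a :: (mid ++ [b])) ∧
          minDel (a :: (mid ++ [b])).dropLast ≤ 1 + minDel (a :: (mid ++ [b])) := by
        rw [htail, hinit, minDel_split]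
        split_ifs with hab
        · exact ⟨(IHmid.2 b).2, (IHmid.2 a).1⟩
        · have h1 := (IHmid.2 b).2
          have h2 := (IHmid.2 a).1
          constructor <;> omega
      refine ⟨hL2, fun c => ?_⟩
      constructor
      · -- c :: t
        have hsplit := minDel_split c b (a :: mid)
        rw [show (c :: ((a :: mid) ++ [b])) = c :: (a :: (mid ++ [b])) by simp] at hsplit
        rw [hsplit]
        split_ifs with hcb
        · have := hL2.2; rw [hinit] at this; exact this
        · have : minDel ((a :: mid) ++ [b]) = minDel (a :: (mid ++ [b])) := by simp
          omega
      · -- t ++ [c]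
        have hsplit := minDel_split a c (mid ++ [b])
        rw [show (a :: ((mid ++ [b]) ++ [c])) = (a :: (mid ++ [b])) ++ [c] by simp] at hsplit
        rw [hsplit]
        split_ifs with hac
        · have := hL2.1; rw [htail] at this; exact this
        · have : minDel (a :: (mid ++ [b] ++ [c])).dropLast = minDel (a :: (mid ++ [b])) := by
            rw [show a :: (mid ++ [b] ++ [c]) = (a :: (mid ++ [b])) ++ [c] by simp,
              List.dropLast_concat]
          omega

-- minDel is smaller than the length, for nonempty lists.
lemma minDel_lt_length : ∀ n (s : List Char), s.length = n → s ≠ [] → minDel s < s.length := by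
  intro n
  induction n using Nat.strong_induction_on with
  | _ n IH =>
    intro s hs hne
    by_cases hle : s.length ≤ 1
    · match s, hne, hle with
      | [a], _, _ => simp [minDel_single]
    · obtain ⟨a, mid, b, rfl⟩ := split2 s (by omega)
      have hlen : mid.length + 2 = n := by simpa using hs
      rw [minDel_split]
      split_ifs with hab
      · rcases eq_or_ne mid [] with rfl | hmid
        · simp [minDel_nil]
        · have := IH mid.length (by omega) mid rfl hmid
          simp; omega
      · have := IH (mid ++ [b]).length (by simp; omega) (mid ++ [b]) rfl (by simp)
        simp at this ⊢
        omega

-- Main bridge: A's backtracking search equals "minDel ≤ budget" (plus the budget-sign check).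
lemma canA_eq_minDel : ∀ n (s : List Char) (k : Int), s.length = n →
    canA s k = (decide (0 ≤ k) && decide ((minDel s : Int) ≤ k)) := by
  intro n
  induction n using Nat.strong_induction_on with
  | _ n IH =>
    intro s k hs
    by_cases hk : k < 0
    · rw [canA]
      simp [hk, show ¬ (0 ≤ k) by omega]
    · by_cases hsmall : (s.length : Int) ≤ max 1 k
      · have hA : canA s k = true := by rw [canA]; simp [hk, hsmall]
        have hd : (minDel s : Int) ≤ k := by
          rcases eq_or_ne s [] with rfl | hne
          · simp [minDel_nil]; omega
          · by_cases h1 : s.length ≤ 1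
            · match s, hne, h1 with
              | [a], _, _ => simp [minDel_single]; omega
            · have hlt := minDel_lt_length s.length s rfl hne
              omega
        simp [hA, hd, show (0:Int) ≤ k by omega]
      · obtain ⟨a, mid, b, rfl⟩ := split2 s (by omega)
        have hlen : mid.length + 2 = n := by simpa using hs
        rw [canA_split a b mid k (by omega) (by omega)]
        have IHmid := IH mid.length (by omega) mid k rfl
        have IHtail := IH (mid ++ [b]).length (by simp; omega) (mid ++ [b]) (k - 1) rfl
        have IHinit := IH (a :: mid).length (by simp; omega) (a :: mid) (k - 1) rfl
        rw [IHmid, IHtail, IHinit, minDel_split]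
        have htail' : minDel mid ≤ 1 + minDel (mid ++ [b]) := by
          have := (minDel_move (mid ++ [b]).length (mid ++ [b]) rfl).1.2
          rwa [List.dropLast_concat] at this
        have hinit' : minDel mid ≤ 1 + minDel (a :: mid) := by
          simpa using (minDel_move (a :: mid).length (a :: mid) rfl).1.1
        split_ifs with hab
        · have hbeq : (a == b) = true := by simp [hab]
          simp only [hbeq, Bool.true_and]
          rw [Bool.eq_iff_iff]
          simp only [Bool.or_eq_true, Bool.and_eq_true, decide_eq_true_eq]
          push_cast at htail' hinit' ⊢
          omega
        · have hne2 : (a == b) = false := by simp [hab]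
          simp only [hne2, Bool.false_and, Bool.false_or]
          rw [Bool.eq_iff_iff]
          simp only [Bool.or_eq_true, Bool.and_eq_true, decide_eq_true_eq]
          push_cast
          omega

-- ---- B-side bridge: point evaluation helpers ----
lemma minDel_short (s : List Char) (h : s.length ≤ 1) : minDel s = 0 := by
  rw [minDel]; simp [h]

lemma getD_map_range (f : Nat → Nat) (m i : Nat) (h : i < m) :
    ((List.range m).map f).getD i 0 = f i := by
  simp [List.getD, h]

-- One DP transition, phrased on a slice u.take l.
lemma minDel_slice (u : List Char) (l : Nat) (h2 : 2 ≤ l) (hl : l ≤ u.length) :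
    minDel (u.take l) =
      if u[0]? == u[l - 1]? then minDel ((u.drop 1).take (l - 2))
      else 1 + min (minDel ((u.drop 1).take (l - 1))) (minDel (u.take (l - 1))) := by
  obtain ⟨a, mid, b, hsplit⟩ := split2 (u.take l) (by rw [List.length_take]; omega)
  have hlen : (u.take l).length = l := by rw [List.length_take]; omega
  have hmlen : mid.length + 2 = l := by rw [hsplit] at hlen; simpa using hlen
  have h0 : u[0]? = some a := by
    have h' : (u.take l)[0]? = some a := by rw [hsplit]; rfl
    rwa [List.getElem?_take_of_lt (by omega)] at h'
  have hlast : u[l - 1]? = some b := by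
    have h' : (u.take l)[l - 1]? = some b := by
      rw [hsplit, show l - 1 = (a :: (mid ++ [b])).length - 1 by simp; omega,
        ← List.getLast?_eq_getElem?]
      rw [show a :: (mid ++ [b]) = (a :: mid) ++ [b] by simp]
      exact List.getLast?_concat
    rwa [List.getElem?_take_of_lt (by omega)] at h'
  have htail : (u.drop 1).take (l - 1) = mid ++ [b] := by
    have := congrArg (List.drop 1) hsplit
    simpa [List.drop_take] using this
  have hinit : u.take (l - 1) = a :: mid := by
    have := congrArg List.dropLast hsplit
    rw [List.dropLast_eq_take, hlen, List.take_take,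
      show a :: (mid ++ [b]) = (a :: mid) ++ [b] by simp, List.dropLast_concat] at this
    simpa [Nat.min_le_left, Nat.min_eq_left (by omega : l - 1 ≤ l)] using this
  have hmid : (u.drop 1).take (l - 2) = mid := by
    have := congrArg List.dropLast htail
    rw [List.dropLast_eq_take, List.length_take, List.dropLast_concat] at this
    have hdl : (u.drop 1).length = u.length - 1 := by simp
    rw [List.take_take] at this
    have hmin : min (min (l - 1) (u.drop 1).length - 1) (l - 1) = l - 2 := by
      rw [hdl]; omega
    rwa [hmin] at this
  rw [hsplit, minDel_split, h0, hlast, htail, hinit, hmid]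
  by_cases hab : a = b <;> simp [hab]

-- Recursion view of Source B's row loop.
def dpB (cs : List Char) (n : Nat) : Nat → List Nat × List Nat
  | 0 => (List.replicate (n + 1) 0, List.replicate n 0)
  | j + 1 => ((dpB cs n j).2, bStep cs n (j + 2) (dpB cs n j).1 (dpB cs n j).2)

lemma bLoop_eq_dpB (cs : List Char) (n : Nat) : bLoop cs n = dpB cs n (n - 1) := by
  suffices h : ∀ m, (List.range' 2 m).foldl (fun p l => (p.2, bStep cs n l p.1 p.2))
      (List.replicate (n + 1) 0, List.replicate n 0) = dpB cs n m from h (n - 1)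
  intro m
  induction m with
  | zero => rfl
  | succ m ih =>
    rw [List.range'_concat, List.foldl_append, ih, show 2 + 1 * m = m + 2 from by omega]
    rfl

lemma getD_rep (n i : Nat) : (List.replicate n (0 : Nat)).getD i 0 = 0 := by
  by_cases h : i < n <;> simp [List.getD, h]

-- Row invariant: after j loop steps the two rows hold minDel of all slices of
-- lengths j and j+1.
lemma dpB_spec (cs : List Char) : ∀ j, j + 1 ≤ cs.length →
    (∀ i, i + j ≤ cs.length →
      ((dpB cs cs.length j).1).getD i 0 = minDel ((cs.drop i).take j)) ∧
    (∀ i, i + (j + 1) ≤ cs.length →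
      ((dpB cs cs.length j).2).getD i 0 = minDel ((cs.drop i).take (j + 1))) := by
  intro j
  induction j with
  | zero =>
    intro _
    constructor
    · intro i hi
      simp only [dpB]
      rw [getD_rep, List.take_zero, minDel_nil]
    · intro i hi
      have hln : ((cs.drop i).take 1).length ≤ 1 := by
        simp [List.length_take]
      simp only [dpB]
      rw [getD_rep, minDel_short _ hln]
  | succ j ih =>
    intro h
    have ihh := ih (by omega)
    constructor
    · intro i hi
      simpa [dpB] using ihh.2 i hi
    · intro i hi
      have hdp : (dpB cs cs.length (j + 1)).2 =
          bStep cs cs.length (j + 2) (dpB cs cs.length j).1 (dpB cs cs.length j).2 := by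
        simp [dpB]
      have hstep := getD_map_range (fun i =>
          if cs[i]? == cs[i + (j + 2) - 1]? then ((dpB cs cs.length j).1).getD (i + 1) 0
          else 1 + min (((dpB cs cs.length j).2).getD (i + 1) 0)
            (((dpB cs cs.length j).2).getD i 0))
          (cs.length - (j + 2) + 1) i (by omega)
      rw [hdp, bStep, hstep]
      have hslice := minDel_slice (cs.drop i) (j + 2) (by omega) (by simp; omega)
      have e0 : (cs.drop i)[0]? = cs[i]? := by
        rw [List.getElem?_drop, show i + 0 = i from rfl]
      have el : (cs.drop i)[j + 2 - 1]? = cs[i + (j + 2) - 1]? := by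
        rw [List.getElem?_drop, show i + (j + 2 - 1) = i + (j + 2) - 1 from by omega]
      have edrop : (cs.drop i).drop 1 = cs.drop (i + 1) := by
        rw [List.drop_drop]
      rw [e0, el, edrop] at hslice
      rw [hslice]
      have r1 := ihh.1 (i + 1) (by omega)
      have r2 := ihh.2 (i + 1) (by omega)
      have r3 := ihh.2 i (by omega)
      simp only [show j + 2 - 2 = j by omega, show j + 2 - 1 = j + 1 by omega] at *
      rw [r1, r2, r3]

-- B computes exactly "0 ≤ k and minDel ≤ k".
lemma alt_eq_minDel (s : String) (k : Int) :
    can_make_palindrome_alt s k = (decide (0 ≤ k) && decide ((minDel s.toList : Int) ≤ k)) := by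
  unfold can_make_palindrome_alt
  by_cases hk : k < 0
  · rw [if_pos hk]
    simp [show ¬ (0 ≤ k) by omega]
  · by_cases hsm : (s.toList.length : Int) ≤ k + 1
    · have hd : (minDel s.toList : Int) ≤ k := by
        rcases eq_or_ne s.toList [] with he | hne
        · rw [he]; simp [minDel_nil]; omega
        · have := minDel_lt_length s.toList.length s.toList rfl hne
          omega
      rw [if_neg hk, if_pos hsm]
      simp [hd, show (0 : Int) ≤ k by omega]
    · have hrow := (dpB_spec s.toList (s.toList.length - 1) (by omega)).2 0 (by omega)
      rw [show s.toList.length - 1 + 1 = s.toList.length by omega] at hrow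
      simp only [List.drop_zero, List.take_length] at hrow
      rw [if_neg hk, if_neg hsm, bLoop_eq_dpB, hrow]
      simp [show (0 : Int) ≤ k by omega]

-- ===== VERDICT (by name: the statement is the Claim_ definition above) =====
theorem can_make_palindrome_spec : Claim_equal_can_make_palindrome := by
  intro s k _
  unfold Spec_can_make_palindrome can_make_palindrome
  rw [canA_eq_minDel s.toList.length s.toList k rfl, alt_eq_minDel]
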